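-- pv_equiv track=rewrite | github.com/MrBrantCode/unitest_baseline | mut_generate/mist_train_taco/taco_284/solution.py | count_years_with_one_zero_in_binary
-- ===== SOURCE A (Python) =====
-- def count_years_with_one_zero_in_binary(a, b):
--     count = 0
--     for i in range(2, 61):
--         num = (1 << i) - 1
--         for j in range(0, i - 1):
--             year = num - (1 << j)
--             if a <= year <= b:
--                 count += 1
--     return count
-- ===== SOURCE B (Python) =====
-- def _bisect_left(ys, x):
--     # standard bisect_left on a sorted list (hand-written: no imports available)
--     lo, hi = 0, len(ys)
--     while lo < hi:
--         mid = (lo + hi) // 2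
--         if ys[mid] < x:
--             lo = mid + 1
--         else:
--             hi = mid
--     return lo
--
--
-- def _bisect_right(ys, x):
--     # standard bisect_right on a sorted list
--     lo, hi = 0, len(ys)
--     while lo < hi:
--         mid = (lo + hi) // 2
--         if ys[mid] <= x:
--             lo = mid + 1
--         else:
--             hi = mid
--     return lo
--
--
-- def count_years_with_one_zero_in_binary(a, b):
--     # build every number whose binary form is all ones except a single zero
--     # (bit-lengths 2..60, as in the original), then count those in [a, b]
--     # with two binary searches on the sorted table.
--     ys = sorted((1 << i) - 1 - (1 << j) for i in range(2, 61) for j in range(i - 1))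
--     left = _bisect_left(ys, a)
--     right = _bisect_right(ys, b)
--     return right - left if right > left else 0
-- ===== Notes on version B (the rewrite author's own statement) =====
-- stated objective: alternative
-- what changed: Instead of testing every candidate against [a,b] inside the generation loops, B generates all one-zero numbers unconditionally, sorts them once, and counts via two hand-written binary searches (bisect_right(b) - bisect_left(a), clamped at 0).
import Mathlib
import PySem

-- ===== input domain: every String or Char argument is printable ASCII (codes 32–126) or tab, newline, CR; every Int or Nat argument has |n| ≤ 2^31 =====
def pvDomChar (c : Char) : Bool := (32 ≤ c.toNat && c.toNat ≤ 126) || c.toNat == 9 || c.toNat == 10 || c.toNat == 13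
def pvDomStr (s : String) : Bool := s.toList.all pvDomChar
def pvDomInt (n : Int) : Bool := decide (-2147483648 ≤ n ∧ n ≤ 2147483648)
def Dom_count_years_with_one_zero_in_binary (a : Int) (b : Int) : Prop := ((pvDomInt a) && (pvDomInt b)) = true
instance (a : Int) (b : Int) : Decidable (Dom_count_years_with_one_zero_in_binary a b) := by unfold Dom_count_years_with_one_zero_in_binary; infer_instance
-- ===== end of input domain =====

-- B replaces the per-candidate range test with one sorted table and two binary searches (alternative decomposition, same cost class).
-- ===== PORT A =====
-- count = 0; for i in range(2,61): num=(1<<i)-1; for j in range(0,i-1): year=num-(1<<j); if a<=year<=b: count+=1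
-- (1 << k) on the nonnegative k in range is ported exactly as 2 ^ k.toNat
def count_years_with_one_zero_in_binary (a : Int) (b : Int) : Int :=
  (PySem.List.pyRange 2 61 1).foldl (fun count i =>
    (PySem.List.pyRange 0 (i - 1) 1).foldl (fun count j =>
      if a ≤ 2 ^ i.toNat - 1 - 2 ^ j.toNat ∧ 2 ^ i.toNat - 1 - 2 ^ j.toNat ≤ b
      then count + 1 else count) count) 0

-- ===== PORT B =====
-- B: sorted comprehension of all candidates, then two binary searches.
-- Source B's hand-written _bisect_left/_bisect_right are exactly CPython's bisect_left/bisect_right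
-- loops, ported as the prelude primitives PySem.List.bisectLeft / bisectRight (the same loop).
def count_years_with_one_zero_in_binary_alt (a : Int) (b : Int) : Int :=
  let ys := PySem.List.sorted
    ((PySem.List.pyRange 2 61 1).flatMap (fun i =>
      (PySem.List.pyRange 0 (i - 1) 1).map (fun j => (2 ^ i.toNat - 1) - 2 ^ j.toNat)))
    (fun y => y) false
  let left := PySem.List.bisectLeft ys a
  let right := PySem.List.bisectRight ys b
  if right > left then (right : Int) - (left : Int) else 0

-- ===== PRECONDITION & SPEC =====
def Spec_count_years_with_one_zero_in_binary (a : Int) (b : Int) (out : Int) : Prop := out = count_years_with_one_zero_in_binary_alt a b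
instance (a : Int) (b : Int) (out : Int) : Decidable (Spec_count_years_with_one_zero_in_binary a b out) := by unfold Spec_count_years_with_one_zero_in_binary; infer_instance

-- ===== CLAIM (what is proved, stated in full; the proofs are below) =====
def Claim_equal_count_years_with_one_zero_in_binary : Prop := ∀ (a : Int) (b : Int), Dom_count_years_with_one_zero_in_binary a b → Spec_count_years_with_one_zero_in_binary a b (count_years_with_one_zero_in_binary a b)

-- ===== LEMMAS AND PROOFS =====

-- the candidate list, in generation order
def pvYears : List Int :=
  (PySem.List.pyRange 2 61 1).flatMap (fun i =>
    (PySem.List.pyRange 0 (i - 1) 1).map (fun j => (2 ^ i.toNat - 1) - 2 ^ j.toNat))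

-- A equals the count of candidates lying in [a, b]
-- sum of casts of a Nat-valued map
lemma pv_sum_map_cast (c : Int → Nat) : ∀ (l : List Int),
    (l.map (fun i => ((c i : Nat) : Int))).sum = ((l.map c).sum : Int) := by
  intro l
  induction l with
  | nil => simp
  | cons x t ih => simp [ih]

set_option maxHeartbeats 1000000 in
lemma pv_A_eq_countP (a b : Int) :
    count_years_with_one_zero_in_binary a b
      = (pvYears.countP (fun y => decide (a ≤ y ∧ y ≤ b)) : Int) := by
  unfold count_years_with_one_zero_in_binary pvYears
  have hinner : ∀ (acc : Int), ∀ i ∈ PySem.List.pyRange 2 61 1,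
      (PySem.List.pyRange 0 (i - 1) 1).foldl (fun count j =>
        if a ≤ 2 ^ i.toNat - 1 - 2 ^ j.toNat ∧ 2 ^ i.toNat - 1 - 2 ^ j.toNat ≤ b
        then count + 1 else count) acc
      = acc + (((PySem.List.pyRange 0 (i - 1) 1).countP
          (fun j => decide (a ≤ 2 ^ i.toNat - 1 - 2 ^ j.toNat ∧ 2 ^ i.toNat - 1 - 2 ^ j.toNat ≤ b)) : Nat) : Int) :=
    fun acc i _ => PySem.List.foldl_ite_add_one _ _ acc
  rw [PySem.List.foldl_congr_mem _ _ _ _ hinner, PySem.List.foldl_add]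
  rw [List.flatMap_def, List.countP_flatten, List.map_map]
  rw [pv_sum_map_cast (fun i => (PySem.List.pyRange 0 (i - 1) 1).countP
        (fun j => decide (a ≤ 2 ^ i.toNat - 1 - 2 ^ j.toNat ∧ 2 ^ i.toNat - 1 - 2 ^ j.toNat ≤ b)))]
  simp only [zero_add, Function.comp_def, List.countP_map]

-- a list whose predicate holds exactly below index m has countP = m
lemma pv_countP_eq_of_split (p : Int → Bool) :
    ∀ (ys : List Int) (m : Nat), m ≤ ys.length →
      (∀ j (hj : j < ys.length), j < m → p ys[j] = true) →
      (∀ j (hj : j < ys.length), m ≤ j → p ys[j] = false) →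
      ys.countP p = m := by
  intro ys
  induction ys with
  | nil => intro m hm _ _; simp only [List.length_nil] at hm; simp [Nat.le_zero.mp hm]
  | cons y t ih =>
    intro m hm hpos hneg
    cases m with
    | zero =>
      have h0 : p y = false := hneg 0 (by simp) (by omega)
      have ht : t.countP p = 0 :=
        ih 0 (by omega) (fun j hj hlt => by omega)
          (fun j hj _ => by
            have := hneg (j + 1) (by simp [List.length_cons]; omega) (by omega)
            simpa using this)
      simp [List.countP_cons, h0, ht]
    | succ m' =>
      have h0 : p y = true := hpos 0 (by simp) (by omega)
      have ht : t.countP p = m' :=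
        ih m' (by simp [List.length_cons] at hm; omega)
          (fun j hj hlt => by
            have := hpos (j + 1) (by simp [List.length_cons]; omega) (by omega)
            simpa using this)
          (fun j hj hge => by
            have := hneg (j + 1) (by simp [List.length_cons]; omega) (by omega)
            simpa using this)
      simp [List.countP_cons, h0, ht]

lemma pv_bisectLeft_countP (ys : List Int) (x : Int)
    (hs : ys.Pairwise (fun u v => u ≤ v)) :
    ys.countP (fun y => decide (y < x)) = PySem.List.bisectLeft ys x := by
  obtain ⟨h1, h2, h3⟩ := PySem.List.bisectLeft_spec ys x hs
  refine pv_countP_eq_of_split _ ys _ h1 (fun j hj hlt => ?_) (fun j hj hle => ?_)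
  · exact decide_eq_true (h2 j hj hlt)
  · exact decide_eq_false (not_lt.mpr (h3 j hj hle))

lemma pv_bisectRight_countP (ys : List Int) (x : Int)
    (hs : ys.Pairwise (fun u v => u ≤ v)) :
    ys.countP (fun y => decide (y ≤ x)) = PySem.List.bisectRight ys x := by
  obtain ⟨h1, h2, h3⟩ := PySem.List.bisectRight_spec ys x hs
  refine pv_countP_eq_of_split _ ys _ h1 (fun j hj hlt => ?_) (fun j hj hle => ?_)
  · exact decide_eq_true (h2 j hj hlt)
  · exact decide_eq_false (not_le.mpr (h3 j hj hle))

lemma pv_split_le (a b : Int) (hab : a ≤ b) : ∀ (ys : List Int),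
    ys.countP (fun y => decide (y ≤ b))
      = ys.countP (fun y => decide (y < a)) + ys.countP (fun y => decide (a ≤ y ∧ y ≤ b)) := by
  intro ys
  induction ys with
  | nil => simp
  | cons y t ih =>
    simp only [List.countP_cons, ih, decide_eq_true_eq]
    split_ifs <;> omega

lemma pv_split_gt (a b : Int) (hab : b < a) : ∀ (ys : List Int),
    ys.countP (fun y => decide (a ≤ y ∧ y ≤ b)) = 0
      ∧ ys.countP (fun y => decide (y ≤ b)) ≤ ys.countP (fun y => decide (y < a)) := by
  intro ys
  induction ys with
  | nil => simp
  | cons y t ih =>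
    obtain ⟨ih1, ih2⟩ := ih
    constructor
    · have hno : ¬(a ≤ y ∧ y ≤ b) := by omega
      rw [List.countP_cons, ih1]
      simp [hno]
    · simp only [List.countP_cons, decide_eq_true_eq]
      split_ifs <;> omega

lemma pv_main (a b : Int) :
    Spec_count_years_with_one_zero_in_binary a b (count_years_with_one_zero_in_binary a b) := by
  unfold Spec_count_years_with_one_zero_in_binary count_years_with_one_zero_in_binary_alt
  show count_years_with_one_zero_in_binary a b
      = (if PySem.List.bisectRight (PySem.List.sorted pvYears (fun y => y) false) b
            > PySem.List.bisectLeft (PySem.List.sorted pvYears (fun y => y) false) a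
         then ((PySem.List.bisectRight (PySem.List.sorted pvYears (fun y => y) false) b : Nat) : Int)
              - ((PySem.List.bisectLeft (PySem.List.sorted pvYears (fun y => y) false) a : Nat) : Int)
         else 0)
  rw [pv_A_eq_countP a b]
  set ys := PySem.List.sorted pvYears (fun y => y) false with hys
  have hperm : ys.Perm pvYears := PySem.List.sorted_perm pvYears (fun y => y) false
  have hsort : ys.Pairwise (fun u v => u ≤ v) := PySem.List.sorted_pairwise pvYears (fun y => y)
  have hc : pvYears.countP (fun y => decide (a ≤ y ∧ y ≤ b))
      = ys.countP (fun y => decide (a ≤ y ∧ y ≤ b)) := (hperm.countP_eq _).symm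
  rw [hc]
  have hl := pv_bisectLeft_countP ys a hsort
  have hr := pv_bisectRight_countP ys b hsort
  by_cases hab : a ≤ b
  · have hsum := pv_split_le a b hab ys
    rw [hl, hr] at hsum
    split <;> rename_i hcmp <;> omega
  · obtain ⟨hz, hle⟩ := pv_split_gt a b (by omega) ys
    rw [hl, hr] at hle
    rw [hz]
    split <;> rename_i hcmp <;> omega


-- ===== VERDICT (by name: the statement is the Claim_ definition above) =====
theorem count_years_with_one_zero_in_binary_spec : Claim_equal_count_years_with_one_zero_in_binary := by
  intro a b _
  exact pv_main a b
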